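-- pv_equiv track=rewrite | github.com/ejfn/advent-of-code | 2017/24/day24.py | build_bridges
-- ===== SOURCE A (Python) =====
-- def build_bridges(components, port, used, current_strength, current_length):
--     """Generate all possible bridges from current state."""
--     yield (current_strength, current_length)
--
--     for i, (a, b) in enumerate(components):
--         if i in used:
--             continue
--
--         if a == port:
--             yield from build_bridges(
--                 components, b, used | {i},
--                 current_strength + a + b, current_length + 1
--             )
--         elif b == port:
--             yield from build_bridges(
--                 components, a, used | {i},
--                 current_strength + a + b, current_length + 1
--             )
-- ===== SOURCE B (Python) =====
-- def build_bridges(components, port, used, current_strength, current_length):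
--     """Generate all possible bridges from current state (iterative, explicit stack)."""
--     stack = [(port, used, current_strength, current_length)]
--     while stack:
--         p, u, s, l = stack.pop()
--         yield (s, l)
--         children = []
--         for i, (a, b) in enumerate(components):
--             if i in u:
--                 continue
--             if a == p:
--                 children.append((b, u | {i}, s + a + b, l + 1))
--             elif b == p:
--                 children.append((a, u | {i}, s + a + b, l + 1))
--         stack.extend(reversed(children))
-- ===== Notes on version B (the rewrite author's own statement) =====
-- stated objective: alternative
-- what changed: The recursive generator is replaced by an iterative generator with an explicit LIFO stack of (port, used, strength, length) states; each popped state is yielded and its compatible extensions are pushed in reversed index order, reproducing A's pre-order left-to-right enumeration without recursion.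
import Mathlib
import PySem

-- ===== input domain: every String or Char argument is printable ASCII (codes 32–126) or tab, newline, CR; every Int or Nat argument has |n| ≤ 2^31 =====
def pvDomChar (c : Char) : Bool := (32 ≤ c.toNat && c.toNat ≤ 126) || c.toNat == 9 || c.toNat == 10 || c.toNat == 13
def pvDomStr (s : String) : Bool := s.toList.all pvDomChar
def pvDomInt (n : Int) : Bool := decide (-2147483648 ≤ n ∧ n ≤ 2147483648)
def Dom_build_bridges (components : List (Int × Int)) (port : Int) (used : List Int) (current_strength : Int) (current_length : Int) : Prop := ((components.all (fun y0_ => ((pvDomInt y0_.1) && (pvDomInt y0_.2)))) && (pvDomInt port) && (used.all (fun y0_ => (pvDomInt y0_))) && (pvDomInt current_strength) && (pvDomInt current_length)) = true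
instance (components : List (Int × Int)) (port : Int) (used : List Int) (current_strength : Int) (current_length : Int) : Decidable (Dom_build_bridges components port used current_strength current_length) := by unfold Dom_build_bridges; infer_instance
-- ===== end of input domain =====

-- B replaces A's recursive generator by an iterative one driven by an explicit LIFO stack
-- (children pushed in reversed index order), same values in the same pre-order; objective: alternative.
-- termination helpers for both ports (cited in their decreasing_by)

-- number of component indices not yet used
def unusedCount (components : List (Int × Int)) (used : List Int) : Nat :=
  ((List.range components.length).filter (fun k => !(PySem.Set.contains used (Int.ofNat k)))).length

-- adding an unused in-range index strictly decreases unusedCount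
theorem unused_lt (components : List (Int × Int)) (used : List Int) (k : Nat)
    (h1 : k < components.length) (h2 : ¬ PySem.Set.contains used (Int.ofNat k) = true) :
    unusedCount components (PySem.Set.union used [Int.ofNat k]) < unusedCount components used := by
  unfold unusedCount
  have hadd : PySem.Set.union used [Int.ofNat k] = used ++ [Int.ofNat k] := by
    show (if used.contains (Int.ofNat k) then used else used ++ [Int.ofNat k]) = _
    simp [PySem.Set.contains] at h2
    simp [h2]
  rw [hadd]
  have hmono : ((List.range components.length).filter
      (fun j => !(PySem.Set.contains (used ++ [Int.ofNat k]) (Int.ofNat j)))).Sublist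
      ((List.range components.length).filter (fun j => !(PySem.Set.contains used (Int.ofNat j)))) := by
    apply List.monotone_filter_right
    intro j hj
    simp [PySem.Set.contains, List.contains_eq_mem] at hj ⊢
    exact fun hm => hj.1 hm
  refine Nat.lt_of_le_of_ne (hmono.length_le) (fun heq => ?_)
  have hsub := hmono.eq_of_length heq
  have hk : k ∈ (List.range components.length).filter
      (fun j => !(PySem.Set.contains used (Int.ofNat j))) := by
    simp [List.mem_filter, h1, PySem.Set.contains, List.contains_eq_mem]
    simpa [PySem.Set.contains, List.contains_eq_mem] using h2
  rw [← hsub] at hk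
  have : PySem.Set.contains (used ++ [Int.ofNat k]) (Int.ofNat k) = true := by
    simp [PySem.Set.contains, List.contains_eq_mem]
  simp [List.mem_filter, PySem.Set.contains, List.contains_eq_mem] at hk

-- ===== PORT A =====
def build_bridges (components : List (Int × Int)) (port : Int) (used : List Int) (current_strength : Int) (current_length : Int) : List (Int × Int) :=
  (PySem.List.enumerate components 0).attach.foldl
    (fun acc x =>
      if _h1 : PySem.Set.contains used x.1.1 then acc
      else if x.1.2.1 = port then
        acc ++ build_bridges components x.1.2.2 (PySem.Set.union used [x.1.1])
          (current_strength + x.1.2.1 + x.1.2.2) (current_length + 1)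
      else if x.1.2.2 = port then
        acc ++ build_bridges components x.1.2.1 (PySem.Set.union used [x.1.1])
          (current_strength + x.1.2.1 + x.1.2.2) (current_length + 1)
      else acc)
    [(current_strength, current_length)]
termination_by unusedCount components used
decreasing_by
  all_goals
    obtain ⟨k, hk, hpk⟩ := (PySem.List.mem_enumerate_iff components 0 x.1).mp x.2
    have hx1 : x.1.1 = Int.ofNat k := by rw [hpk]; simp
    rw [hx1]; rw [hx1] at _h1
    exact unused_lt components used k hk _h1

-- ===== PORT B =====
-- one stack state: (port, used, strength, length)
-- the children collected while scanning components left-to-right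
def altChildren (components : List (Int × Int)) (p : Int) (u : List Int) (s l : Int) :
    List (Int × List Int × Int × Int) :=
  (PySem.List.enumerate components 0).foldl
    (fun acc x =>
      if PySem.Set.contains u x.1 then acc
      else if x.2.1 = p then acc ++ [(x.2.2, PySem.Set.union u [x.1], s + x.2.1 + x.2.2, l + 1)]
      else if x.2.2 = p then acc ++ [(x.2.1, PySem.Set.union u [x.1], s + x.2.1 + x.2.2, l + 1)]
      else acc)
    []

-- measure of a whole stack: each state weighs (n+2)^unusedCount
def stackMeasure (components : List (Int × Int)) (stack : List (Int × List Int × Int × Int)) : Nat :=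
  (stack.map (fun st => (components.length + 2) ^ unusedCount components st.2.1)).sum

-- what one scanned component contributes to the children list
def childGen (p : Int) (u : List Int) (s l : Int) (x : Int × Int × Int) :
    List (Int × List Int × Int × Int) :=
  if PySem.Set.contains u x.1 then []
  else if x.2.1 = p then [(x.2.2, PySem.Set.union u [x.1], s + x.2.1 + x.2.2, l + 1)]
  else if x.2.2 = p then [(x.2.1, PySem.Set.union u [x.1], s + x.2.1 + x.2.2, l + 1)]
  else []

theorem altChildren_eq (components : List (Int × Int)) (p : Int) (u : List Int) (s l : Int) :
    altChildren components p u s l =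
      (PySem.List.enumerate components 0).flatMap (childGen p u s l) := by
  unfold altChildren
  have hbody : (fun (acc : List (Int × List Int × Int × Int)) (x : Int × Int × Int) =>
      if PySem.Set.contains u x.1 then acc
      else if x.2.1 = p then acc ++ [(x.2.2, PySem.Set.union u [x.1], s + x.2.1 + x.2.2, l + 1)]
      else if x.2.2 = p then acc ++ [(x.2.1, PySem.Set.union u [x.1], s + x.2.1 + x.2.2, l + 1)]
      else acc) = fun acc x => acc ++ childGen p u s l x := by
    funext acc x
    unfold childGen
    split_ifs <;> simp
  rw [hbody, PySem.List.foldl_append_eq_flatMap]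
  simp

theorem mem_altChildren_unused (components : List (Int × Int)) (p : Int) (u : List Int)
    (s l : Int) (st : Int × List Int × Int × Int) (hst : st ∈ altChildren components p u s l) :
    unusedCount components st.2.1 < unusedCount components u := by
  rw [altChildren_eq] at hst
  obtain ⟨x, hx, hmem⟩ := List.mem_flatMap.mp hst
  obtain ⟨k, hk, hpk⟩ := (PySem.List.mem_enumerate_iff components 0 x).mp hx
  have hx1 : x.1 = Int.ofNat k := by rw [hpk]; simp
  unfold childGen at hmem
  split_ifs at hmem with h1 h2 h3 <;> simp at hmem
  · have : st.2.1 = PySem.Set.union u [x.1] := by rw [hmem]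
    rw [this, hx1]
    exact unused_lt components u k hk
      (by rw [← hx1]; simpa [PySem.Set.contains, List.contains_eq_mem] using h1)
  · have : st.2.1 = PySem.Set.union u [x.1] := by rw [hmem]
    rw [this, hx1]
    exact unused_lt components u k hk
      (by rw [← hx1]; simpa [PySem.Set.contains, List.contains_eq_mem] using h1)

theorem altChildren_length_le (components : List (Int × Int)) (p : Int) (u : List Int)
    (s l : Int) : (altChildren components p u s l).length ≤ components.length := by
  rw [altChildren_eq, List.length_flatMap]
  calc ((PySem.List.enumerate components 0).map (fun x => (childGen p u s l x).length)).sum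
      ≤ ((PySem.List.enumerate components 0).map (fun x => (childGen p u s l x).length)).length • 1 := by
        apply List.sum_le_card_nsmul
        intro n hn
        obtain ⟨x, _, hx⟩ := List.mem_map.mp hn
        rw [← hx]
        unfold childGen
        split_ifs <;> simp
    _ ≤ components.length := by
        simp [PySem.List.length_enumerate]

theorem altChildren_measure (components : List (Int × Int)) (p : Int) (u : List Int) (s l : Int) :
    stackMeasure components (altChildren components p u s l) <
      (components.length + 2) ^ unusedCount components u := by
  rcases h : altChildren components p u s l with _ | ⟨st0, tl⟩
  · unfold stackMeasure
    simp
  · have hne : st0 ∈ altChildren components p u s l := by rw [h]; exact List.mem_cons_self ..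
    have hu1 : 1 ≤ unusedCount components u :=
      Nat.one_le_iff_ne_zero.mpr (fun h0 => by
        have := mem_altChildren_unused components p u s l st0 hne; omega)
    unfold stackMeasure
    rw [← h]
    calc ((altChildren components p u s l).map
          (fun st => (components.length + 2) ^ unusedCount components st.2.1)).sum
        ≤ ((altChildren components p u s l).map
          (fun st => (components.length + 2) ^ unusedCount components st.2.1)).length •
            ((components.length + 2) ^ (unusedCount components u - 1)) := by
          apply List.sum_le_card_nsmul
          intro n hn
          obtain ⟨st, hstmem, hst⟩ := List.mem_map.mp hn
          rw [← hst]
          apply Nat.pow_le_pow_right (by omega)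
          have := mem_altChildren_unused components p u s l st hstmem
          omega
      _ ≤ components.length * ((components.length + 2) ^ (unusedCount components u - 1)) := by
          rw [List.length_map, smul_eq_mul]
          exact Nat.mul_le_mul_right _ (altChildren_length_le components p u s l)
      _ < (components.length + 2) * ((components.length + 2) ^ (unusedCount components u - 1)) := by
          exact (Nat.mul_lt_mul_right (Nat.pow_pos (by omega))).mpr (by omega)
      _ = (components.length + 2) ^ unusedCount components u := by
          rw [← Nat.pow_succ']
          congr 1
          omega

theorem altStack_dec (components : List (Int × Int)) (p : Int) (u : List Int) (s l : Int)
    (rest : List (Int × List Int × Int × Int)) :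
    stackMeasure components (altChildren components p u s l ++ rest) <
      stackMeasure components ((p, u, s, l) :: rest) := by
  unfold stackMeasure at *
  simp only [List.map_append, List.sum_append, List.map_cons, List.sum_cons]
  have := altChildren_measure components p u s l
  unfold stackMeasure at this
  omega

-- the iterative driver: pop a state, emit it, push its children (top of stack = head)
def altLoop (components : List (Int × Int)) (stack : List (Int × List Int × Int × Int)) :
    List (Int × Int) :=
  match stack with
  | [] => []
  | (p, u, s, l) :: rest => (s, l) :: altLoop components (altChildren components p u s l ++ rest)
termination_by stackMeasure components stack
decreasing_by exact altStack_dec components p u s l rest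

def build_bridges_alt (components : List (Int × Int)) (port : Int) (used : List Int) (current_strength : Int) (current_length : Int) : List (Int × Int) :=
  altLoop components [(port, used, current_strength, current_length)]

-- ===== PRECONDITION & SPEC =====
def Spec_build_bridges (components : List (Int × Int)) (port : Int) (used : List Int) (current_strength : Int) (current_length : Int) (out : List (Int × Int)) : Prop := out = build_bridges_alt components port used current_strength current_length
instance (components : List (Int × Int)) (port : Int) (used : List Int) (current_strength : Int) (current_length : Int) (out : List (Int × Int)) : Decidable (Spec_build_bridges components port used current_strength current_length out) := by unfold Spec_build_bridges; infer_instance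

-- ===== CLAIM (what is proved, stated in full; the proofs are below) =====
def Claim_equal_build_bridges : Prop := ∀ (components : List (Int × Int)) (port : Int) (used : List Int) (current_strength : Int) (current_length : Int), Dom_build_bridges components port used current_strength current_length → Spec_build_bridges components port used current_strength current_length (build_bridges components port used current_strength current_length)

-- ===== LEMMAS AND PROOFS =====

theorem A_unfold (components : List (Int × Int)) (p : Int) (u : List Int) (s l : Int) :
    build_bridges components p u s l =
      (s, l) :: (altChildren components p u s l).flatMap
        (fun st => build_bridges components st.1 st.2.1 st.2.2.1 st.2.2.2) := by
  rw [build_bridges]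
  simp only [dite_eq_ite]
  rw [List.foldl_attach (l := PySem.List.enumerate components 0)
    (f := fun (acc : List (Int × Int)) (x : Int × Int × Int) =>
      if PySem.Set.contains u x.1 then acc
      else if x.2.1 = p then
        acc ++ build_bridges components x.2.2 (PySem.Set.union u [x.1]) (s + x.2.1 + x.2.2) (l + 1)
      else if x.2.2 = p then
        acc ++ build_bridges components x.2.1 (PySem.Set.union u [x.1]) (s + x.2.1 + x.2.2) (l + 1)
      else acc)]
  have hbody : (fun (acc : List (Int × Int)) (x : Int × Int × Int) =>
      if PySem.Set.contains u x.1 then acc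
      else if x.2.1 = p then
        acc ++ build_bridges components x.2.2 (PySem.Set.union u [x.1]) (s + x.2.1 + x.2.2) (l + 1)
      else if x.2.2 = p then
        acc ++ build_bridges components x.2.1 (PySem.Set.union u [x.1]) (s + x.2.1 + x.2.2) (l + 1)
      else acc) = fun acc x => acc ++ (childGen p u s l x).flatMap
        (fun st => build_bridges components st.1 st.2.1 st.2.2.1 st.2.2.2) := by
    funext acc x
    unfold childGen
    split_ifs <;> simp
  rw [hbody, PySem.List.foldl_append_eq_flatMap, altChildren_eq]
  simp [List.flatMap_assoc]

theorem altLoop_eq (components : List (Int × Int)) (stack : List (Int × List Int × Int × Int)) :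
    altLoop components stack =
      stack.flatMap (fun st => build_bridges components st.1 st.2.1 st.2.2.1 st.2.2.2) := by
  induction stack using altLoop.induct (components := components) with
  | case1 => simp [altLoop]
  | case2 p u s l rest ih =>
    rw [altLoop, ih, List.flatMap_append]
    simp only [List.flatMap_cons]
    rw [A_unfold]
    simp

-- ===== VERDICT (by name: the statement is the Claim_ definition above) =====
theorem build_bridges_spec : Claim_equal_build_bridges := by
  intro components port used cs cl _
  unfold Spec_build_bridges build_bridges_alt
  rw [altLoop_eq]
  simp
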